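-- pv_equiv track=rewrite | github.com/adsonribeiro/Lista01-Algoritmos-UFPA | Lista 01/08.py | qt_08
-- ===== SOURCE A (Python) =====
-- def qt_08(ls):
--     qtd_E = 0
--     qtd_B = 0
--     qtd_R = 0
--     qtd_I = 0
--     for x in ls:
--         if x == "E":
--             qtd_E= qtd_E + 1
--         if x == "B":
--             qtd_B = qtd_B + 1
--         if x == "R":
--             qtd_R = qtd_R + 1
--         if x == "I":
--             qtd_I = qtd_I + 1
--     return qtd_E, qtd_B, qtd_R,qtd_I
-- ===== SOURCE B (Python) =====
-- def qt_08(ls):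
--     return ls.count("E"), ls.count("B"), ls.count("R"), ls.count("I")
-- ===== Notes on version B (the rewrite author's own statement) =====
-- stated objective: idiomatic
-- what changed: Replaces the single accumulating pass with four independent list.count scans, one per letter, returned directly as a tuple.
import Mathlib
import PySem

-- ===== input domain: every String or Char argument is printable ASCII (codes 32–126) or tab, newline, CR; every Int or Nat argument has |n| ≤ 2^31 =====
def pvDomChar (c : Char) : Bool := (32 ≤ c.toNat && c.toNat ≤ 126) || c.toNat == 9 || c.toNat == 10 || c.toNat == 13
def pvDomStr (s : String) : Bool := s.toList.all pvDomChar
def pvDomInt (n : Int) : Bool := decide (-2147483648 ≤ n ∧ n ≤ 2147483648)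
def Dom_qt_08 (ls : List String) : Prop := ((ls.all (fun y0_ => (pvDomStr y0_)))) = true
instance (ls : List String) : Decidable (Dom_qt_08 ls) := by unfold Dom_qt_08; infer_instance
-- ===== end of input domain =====

-- ===== PORT A =====
-- four counters accumulated in one pass over ls, as in A
def qt_08 (ls : List String) : Int × Int × Int × Int :=
  ls.foldl (fun (acc : Int × Int × Int × Int) x =>
    let acc := if x == "E" then (acc.1 + 1, acc.2.1, acc.2.2.1, acc.2.2.2) else acc
    let acc := if x == "B" then (acc.1, acc.2.1 + 1, acc.2.2.1, acc.2.2.2) else acc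
    let acc := if x == "R" then (acc.1, acc.2.1, acc.2.2.1 + 1, acc.2.2.2) else acc
    let acc := if x == "I" then (acc.1, acc.2.1, acc.2.2.1, acc.2.2.2 + 1) else acc
    acc) (0, 0, 0, 0)

-- ===== PORT B =====
-- B: four independent ls.count scans
def qt_08_alt (ls : List String) : Int × Int × Int × Int :=
  ((PySem.List.count ls "E" : Int), (PySem.List.count ls "B" : Int),
   (PySem.List.count ls "R" : Int), (PySem.List.count ls "I" : Int))

-- ===== PRECONDITION & SPEC =====
def Spec_qt_08 (ls : List String) (out : Int × Int × Int × Int) : Prop := out = qt_08_alt ls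
instance (ls : List String) (out : Int × Int × Int × Int) : Decidable (Spec_qt_08 ls out) := by unfold Spec_qt_08; infer_instance

-- ===== CLAIM (what is proved, stated in full; the proofs are below) =====
def Claim_equal_qt_08 : Prop := ∀ (ls : List String), Dom_qt_08 ls → Spec_qt_08 ls (qt_08 ls)

-- ===== LEMMAS AND PROOFS =====

-- ===== VERDICT (by name: the statement is the Claim_ definition above) =====
lemma qt_08_fold (ls : List String) (a b c d : Int) :
    ls.foldl (fun (acc : Int × Int × Int × Int) x =>
      let acc := if x == "E" then (acc.1 + 1, acc.2.1, acc.2.2.1, acc.2.2.2) else acc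
      let acc := if x == "B" then (acc.1, acc.2.1 + 1, acc.2.2.1, acc.2.2.2) else acc
      let acc := if x == "R" then (acc.1, acc.2.1, acc.2.2.1 + 1, acc.2.2.2) else acc
      let acc := if x == "I" then (acc.1, acc.2.1, acc.2.2.1, acc.2.2.2 + 1) else acc
      acc) (a, b, c, d)
    = (a + (ls.count "E" : Int), b + (ls.count "B" : Int),
       c + (ls.count "R" : Int), d + (ls.count "I" : Int)) := by
  induction ls generalizing a b c d with
  | nil => simp
  | cons h t ih =>
    simp only [List.foldl_cons]
    by_cases hE : h = "E" <;> by_cases hB : h = "B" <;> by_cases hR : h = "R" <;>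
      by_cases hI : h = "I" <;>
      simp_all [ih, List.count_cons] <;> omega

theorem qt_08_spec : Claim_equal_qt_08 := by
  intro ls _
  unfold Spec_qt_08 qt_08 qt_08_alt PySem.List.count
  rw [qt_08_fold]
  simp
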